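-- pv_equiv track=rewrite | github.com/letovesnoi/Bioinformatics_Algorithms | lesson5/MultiplePatternMatching.py | Count
-- ===== SOURCE A (Python) =====
-- def Count(LastColumn, C):
--     symbols = ['$', 'A', 'C', 'G', 'T']
--     count = {'$':[0], 'A':[0], 'C':[0], 'G':[0], 'T':[0]}
--     for symbol in symbols:
--         tempCount = 0
--         for i in range(1, len(LastColumn) + 1):
--             j = LastColumn[i - 1]
--             if j == symbol:
--                 tempCount += 1
--             if (i) % C == 0:
--                 count[symbol].append(tempCount)
--     return count
-- ===== SOURCE B (Python) =====
-- def Count(LastColumn, C):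
--     symbols = ['$', 'A', 'C', 'G', 'T']
--     run = {s: 0 for s in symbols}
--     res = {s: [0] for s in symbols}
--     for i, ch in enumerate(LastColumn, 1):
--         if ch in run:
--             run[ch] += 1
--         if i % C == 0:
--             for s in symbols:
--                 res[s].append(run[s])
--     return res
-- ===== Notes on version B (the rewrite author's own statement) =====
-- stated objective: faster
-- what changed: Replaces A's five separate passes over LastColumn (one per symbol, each indexing by position) with a single enumerate pass maintaining a dict of running counts, appending all five counts at each checkpoint.
import Mathlib
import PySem

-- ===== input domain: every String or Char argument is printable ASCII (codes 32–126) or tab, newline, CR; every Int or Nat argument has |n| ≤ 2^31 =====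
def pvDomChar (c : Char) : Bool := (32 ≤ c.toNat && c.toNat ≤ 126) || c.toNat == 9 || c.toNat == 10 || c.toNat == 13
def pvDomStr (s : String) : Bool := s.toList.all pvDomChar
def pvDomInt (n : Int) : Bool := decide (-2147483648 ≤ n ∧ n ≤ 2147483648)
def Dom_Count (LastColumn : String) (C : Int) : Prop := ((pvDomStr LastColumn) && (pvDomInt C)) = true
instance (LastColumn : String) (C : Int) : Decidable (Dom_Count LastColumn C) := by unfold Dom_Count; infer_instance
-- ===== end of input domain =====

-- B replaces A's five per-symbol passes over LastColumn by one pass keeping all five running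
-- counts; same return value. Python's one-character strings (the symbols and LastColumn[i-1])
-- are represented as Char and the dict keys wrapped back to String on return, exactly.

set_option maxRecDepth 4096

-- ===== PORT A =====
def pvSyms : List Char := ['$', 'A', 'C', 'G', 'T']

-- one iteration of A's inner "for i in range(1, len(LastColumn) + 1)" loop
def pvStepA (cs : List Char) (C : Int) (symbol : Char)
    (st : Int × PySem.Dict Char (List Int)) (i : Int) : Int × PySem.Dict Char (List Int) :=
  let j := PySem.List.pyGetD cs (i - 1) ' '
  let tempCount := if j = symbol then st.1 + 1 else st.1
  (tempCount,
    if PySem.Int.mod i C = 0 then st.2.modify symbol [] (fun l => l ++ [tempCount]) else st.2)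

-- one iteration of A's outer "for symbol in symbols" loop (tempCount = 0, then the inner loop)
def pvPassA (cs : List Char) (C : Int)
    (count : PySem.Dict Char (List Int)) (symbol : Char) : PySem.Dict Char (List Int) :=
  ((PySem.List.pyRange 1 (PySem.List.len cs + 1) 1).foldl (pvStepA cs C symbol) (0, count)).2

def Count (LastColumn : String) (C : Int) : List (String × List Int) :=
  let cs := LastColumn.toList
  ((pvSyms.foldl (pvPassA cs C)
      (PySem.Dict.ofList [('$', [0]), ('A', [0]), ('C', [0]), ('G', [0]), ('T', [0])])).items).map
    (fun p => (String.ofList [p.1], p.2))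

-- ===== PORT B =====
-- one iteration of B's single "for i, ch in enumerate(LastColumn, 1)" loop
def pvStepB (C : Int) (st : PySem.Dict Char Int × PySem.Dict Char (List Int))
    (p : Int × Char) : PySem.Dict Char Int × PySem.Dict Char (List Int) :=
  let run := if st.1.contains p.2 then st.1.insert p.2 (st.1.getD p.2 0 + 1) else st.1
  let res := if PySem.Int.mod p.1 C = 0
    then pvSyms.foldl (fun r s => r.modify s [] (fun l => l ++ [run.getD s 0])) st.2
    else st.2
  (run, res)

def Count_alt (LastColumn : String) (C : Int) : List (String × List Int) :=
  ((PySem.List.enumerate LastColumn.toList 1).foldl (pvStepB C)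
      (PySem.Dict.ofList (pvSyms.map fun s => (s, (0 : Int))),
       PySem.Dict.ofList (pvSyms.map fun s => (s, ([0] : List Int))))).2.items.map
    (fun p => (String.ofList [p.1], p.2))

-- ===== PRECONDITION & SPEC =====
-- Pre_ excludes only C = 0 with a nonempty LastColumn: there Python's "i % C" raises
-- ZeroDivisionError (in A and in B alike; with an empty string the loop never runs).
def Pre_Count (LastColumn : String) (C : Int) : Prop := LastColumn.toList = [] ∨ C ≠ 0
instance (LastColumn : String) (C : Int) : Decidable (Pre_Count LastColumn C) := by
  unfold Pre_Count; infer_instance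

def pvWitness_Count : String × Int := ("AC$T", 2)

def Spec_Count (LastColumn : String) (C : Int) (out : List (String × List Int)) : Prop :=
  out = Count_alt LastColumn C
instance (LastColumn : String) (C : Int) (out : List (String × List Int)) :
    Decidable (Spec_Count LastColumn C out) := by unfold Spec_Count; infer_instance

-- ===== CLAIM (what is proved, stated in full; the proofs are below) =====
def Claim_equal_Count : Prop := ∀ (LastColumn : String) (C : Int),
  Dom_Count LastColumn C → Pre_Count LastColumn C → Spec_Count LastColumn C (Count LastColumn C)

-- ===== LEMMAS AND PROOFS =====

-- the checkpointed counts appended for symbol sym during the first m characters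
def pvSeg (cs : List Char) (C : Int) (sym : Char) : Nat → List Int
  | 0 => []
  | m + 1 => pvSeg cs C sym m ++
      (if PySem.Int.mod ((m : Int) + 1) C = 0 then [((cs.take (m + 1)).count sym : Int)] else [])

lemma mk5_getD {α : Type} (w : Char → α) (d0 : α) (c : Char) (h : c ∈ pvSyms) :
    (PySem.Dict.mk (pvSyms.map fun s => (s, w s))).getD c d0 = w c := by
  fin_cases h
  all_goals simp [pvSyms, PySem.Dict.getD, PySem.Dict.get?]

lemma mk5_contains {α : Type} (w : Char → α) (c : Char) :
    (PySem.Dict.mk (pvSyms.map fun s => (s, w s))).contains c = decide (c ∈ pvSyms) := by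
  have h : ∀ a : Char, (a == c) = decide (c = a) := fun a => by
    rw [Bool.eq_iff_iff]; simp; exact eq_comm
  simp only [PySem.Dict.contains, List.any_map]
  simp [pvSyms, h]

lemma mk5_insert {α : Type} (w : Char → α) (c : Char) (h : c ∈ pvSyms) (v : α) :
    (PySem.Dict.mk (pvSyms.map fun s => (s, w s))).insert c v
      = PySem.Dict.mk (pvSyms.map fun s => (s, if s = c then v else w s)) := by
  fin_cases h
  all_goals simp [pvSyms, PySem.Dict.insert, PySem.Dict.contains]

lemma mk5_modify_all (g : Char → Int) (w : Char → List Int) :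
    pvSyms.foldl (fun r s => r.modify s ([] : List Int) (fun l => l ++ [g s]))
      (PySem.Dict.mk (pvSyms.map fun s => (s, w s)))
    = PySem.Dict.mk (pvSyms.map fun s => (s, w s ++ [g s])) := by
  simp [pvSyms, PySem.Dict.modify, PySem.Dict.insert, PySem.Dict.contains,
        PySem.Dict.getD, PySem.Dict.get?, List.foldl]

lemma pvSeg_append (cs ds : List Char) (C : Int) (sym : Char) :
    ∀ m : Nat, m ≤ cs.length → pvSeg (cs ++ ds) C sym m = pvSeg cs C sym m := by
  intro m
  induction m with
  | zero => intro _; rfl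
  | succ m ih =>
      intro h
      simp only [pvSeg, ih (by omega), List.take_append_of_le_length (by omega : m + 1 ≤ cs.length)]

lemma count_take_succ (cs : List Char) (sym : Char) (m : Nat) (hm : m < cs.length) :
    (((cs.take (m + 1)).count sym : Int))
      = (if cs.getD m ' ' = sym then ((cs.take m).count sym : Int) + 1
         else ((cs.take m).count sym : Int)) := by
  have ht : cs.take (m + 1) = cs.take m ++ [cs[m]] := by
    rw [List.take_add_one, List.getElem?_eq_getElem hm]; rfl
  rw [List.getD_eq_getElem cs ' ' hm, ht, List.count_append]
  by_cases hj : cs[m] = sym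
  · rw [if_pos hj, hj]
    push_cast [List.count_cons, List.count_nil]
    simp
  · rw [if_neg hj]
    have : List.count sym [cs[m]] = 0 := by
      simp [List.count_cons, List.count_nil]
      exact fun h => hj h
    rw [this]
    push_cast
    ring

lemma pvPassA_loop (cs : List Char) (C : Int) (sym : Char) (hs : sym ∈ pvSyms)
    (w : Char → List Int) :
    ∀ m : Nat, m ≤ cs.length →
      (PySem.List.pyRange 1 ((m : Int) + 1) 1).foldl (pvStepA cs C sym)
        (0, PySem.Dict.mk (pvSyms.map fun s => (s, w s)))
      = (((cs.take m).count sym : Int),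
         PySem.Dict.mk (pvSyms.map fun s => (s, if s = sym then w sym ++ pvSeg cs C sym m else w s))) := by
  intro m
  induction m with
  | zero =>
      intro _
      rw [PySem.List.pyRange_one_eq_nil (by omega)]
      have hmap : (pvSyms.map fun s => (s, w s))
          = pvSyms.map fun s => (s, if s = sym then w sym ++ pvSeg cs C sym 0 else w s) :=
        List.map_congr_left fun s _ => by by_cases h : s = sym <;> simp [h, pvSeg]
      simp only [List.foldl_nil, List.take_zero, List.count_nil, Nat.cast_zero, hmap]
  | succ m ih =>
      intro hm1
      have hm : m < cs.length := by omega
      rw [show (((m + 1 : Nat) : Int) + 1) = ((m : Int) + 1) + 1 by push_cast; ring,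
          PySem.List.pyRange_one_succ_right (by omega), List.foldl_append, ih (by omega)]
      simp only [List.foldl_cons, List.foldl_nil, pvStepA]
      rw [show ((m : Int) + 1 - 1) = ((m : Int)) by ring, PySem.List.pyGetD_natCast]
      rw [← count_take_succ cs sym m hm]
      refine congrArg (Prod.mk _) ?_
      by_cases hc : PySem.Int.mod ((m : Int) + 1) C = 0
      · rw [if_pos hc, PySem.Dict.modify, mk5_getD _ _ _ hs, mk5_insert _ _ hs]
        refine congrArg _ (List.map_congr_left fun s _ => ?_)
        by_cases h : s = sym <;> simp [h, pvSeg, hc, List.append_assoc]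
      · rw [if_neg hc]
        refine congrArg _ (List.map_congr_left fun s _ => ?_)
        by_cases h : s = sym <;> simp [h, pvSeg, hc]

lemma pvPassA_mk5 (cs : List Char) (C : Int) (sym : Char) (hs : sym ∈ pvSyms)
    (w : Char → List Int) :
    pvPassA cs C (PySem.Dict.mk (pvSyms.map fun s => (s, w s))) sym
      = PySem.Dict.mk (pvSyms.map fun s =>
          (s, if s = sym then w sym ++ pvSeg cs C sym cs.length else w s)) := by
  unfold pvPassA
  rw [show PySem.List.len cs + 1 = ((cs.length : Int) + 1) by simp]
  rw [pvPassA_loop cs C sym hs w cs.length (le_refl _)]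

lemma count_append_singleton (cs : List Char) (c s : Char) :
    (((cs ++ [c]).count s : Nat) : Int) = if s = c then (cs.count s : Int) + 1 else (cs.count s : Int) := by
  rw [List.count_append]
  by_cases h : s = c
  · rw [if_pos h, h]
    push_cast [List.count_cons, List.count_nil]
    simp
  · rw [if_neg h]
    have h0 : List.count s [c] = 0 := by
      simp [List.count_cons, List.count_nil]
      exact fun e => h e.symm
    rw [h0]
    push_cast
    ring

lemma pvAlt_loop (C : Int) (cs : List Char) :
    (PySem.List.enumerate cs 1).foldl (pvStepB C)
      (PySem.Dict.mk (pvSyms.map fun s => (s, (0 : Int))),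
       PySem.Dict.mk (pvSyms.map fun s => (s, ([0] : List Int))))
    = (PySem.Dict.mk (pvSyms.map fun s => (s, (cs.count s : Int))),
       PySem.Dict.mk (pvSyms.map fun s => (s, 0 :: pvSeg cs C s cs.length))) := by
  induction cs using List.reverseRecOn with
  | nil => simp [PySem.List.enumerate_nil, pvSeg]
  | append_singleton cs c ih =>
      rw [PySem.List.enumerate_append, List.foldl_append, ih]
      simp only [PySem.List.enumerate_cons, PySem.List.enumerate_nil, List.foldl_cons,
        List.foldl_nil, pvStepB]
      have hrun : (if (PySem.Dict.mk (pvSyms.map fun s => (s, (cs.count s : Int)))).contains c = true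
            then (PySem.Dict.mk (pvSyms.map fun s => (s, (cs.count s : Int)))).insert c
                   ((PySem.Dict.mk (pvSyms.map fun s => (s, (cs.count s : Int)))).getD c 0 + 1)
            else PySem.Dict.mk (pvSyms.map fun s => (s, (cs.count s : Int))))
          = PySem.Dict.mk (pvSyms.map fun s => (s, ((cs ++ [c]).count s : Int))) := by
        rw [mk5_contains]
        by_cases hc : c ∈ pvSyms
        · rw [if_pos (by simpa using hc), mk5_getD _ _ _ hc, mk5_insert _ _ hc]
          refine congrArg _ (List.map_congr_left fun s _ => ?_)
          rw [count_append_singleton]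
          by_cases h : s = c <;> simp [h]
        · rw [if_neg (by simpa using hc)]
          refine congrArg _ (List.map_congr_left fun s hs => ?_)
          have hne : s ≠ c := fun e => hc (e ▸ hs)
          rw [count_append_singleton, if_neg hne]
      rw [hrun]
      refine congrArg (Prod.mk _) ?_
      rw [show (1 + (cs.length : Int)) = ((cs.length : Int) + 1) by ring]
      have hlen : (cs ++ [c]).length = cs.length + 1 := by simp
      by_cases hm : PySem.Int.mod ((cs.length : Int) + 1) C = 0
      · rw [if_pos hm, mk5_modify_all]
        refine congrArg _ (List.map_congr_left fun s hs => ?_)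
        rw [mk5_getD _ _ _ hs, hlen]
        simp only [pvSeg, pvSeg_append cs [c] C s cs.length (le_refl _), hm, if_pos,
          List.take_of_length_le (by simp : (cs ++ [c]).length ≤ cs.length + 1)]
        simp
      · rw [if_neg hm]
        refine congrArg _ (List.map_congr_left fun s hs => ?_)
        rw [hlen]
        simp only [pvSeg, pvSeg_append cs [c] C s cs.length (le_refl _), hm, if_false]
        simp

-- ===== VERDICT (by name: the statement is the Claim_ definition above) =====
theorem Count_spec : Claim_equal_Count := by
  intro L C _ _
  show Count L C = Count_alt L C
  simp only [Count, Count_alt]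
  rw [show PySem.Dict.ofList [('$', ([0] : List Int)), ('A', [0]), ('C', [0]), ('G', [0]), ('T', [0])]
        = PySem.Dict.mk (pvSyms.map fun s => (s, ([0] : List Int))) from rfl,
      show PySem.Dict.ofList (pvSyms.map fun s => (s, (0 : Int)))
        = PySem.Dict.mk (pvSyms.map fun s => (s, (0 : Int))) from rfl,
      show PySem.Dict.ofList (pvSyms.map fun s => (s, ([0] : List Int)))
        = PySem.Dict.mk (pvSyms.map fun s => (s, ([0] : List Int))) from rfl]
  rw [pvAlt_loop]
  rw [show ∀ {β : Type} (f : β → Char → β) (i : β),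
        pvSyms.foldl f i = f (f (f (f (f i '$') 'A') 'C') 'G') 'T' from fun f i => rfl]
  rw [pvPassA_mk5 _ _ _ (by decide), pvPassA_mk5 _ _ _ (by decide), pvPassA_mk5 _ _ _ (by decide),
      pvPassA_mk5 _ _ _ (by decide), pvPassA_mk5 _ _ _ (by decide)]
  refine congrArg (List.map _)
    (congrArg PySem.Dict.items (congrArg PySem.Dict.mk (List.map_congr_left fun s hs => ?_)))
  fin_cases hs <;> simp
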